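-- pv_equiv track=rewrite | github.com/synvo-ai/FileGram | bench/dashboard/server.py | compute_trace_stats
-- ===== SOURCE A (Python) =====
-- def compute_trace_stats(events: list[dict]) -> dict:
--     """Compute summary statistics from filtered behavioral events."""
--     reads = writes = edits = dirs = deletes = moves = browses = searches = cross_refs = 0
--     files_read = set()
--     files_created = set()
--     for e in events:
--         et = e.get("event_type", "")
--         fp = e.get("file_path", "")
--         if et == "file_read":
--             reads += 1
--             if fp:
--                 files_read.add(fp)
--         elif et == "file_write":
--             writes += 1
--             if fp:
--                 files_created.add(fp)
--         elif et == "file_edit":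
--             edits += 1
--         elif et == "dir_create":
--             dirs += 1
--         elif et == "file_delete":
--             deletes += 1
--         elif et in ("file_move", "file_rename"):
--             moves += 1
--         elif et == "file_browse":
--             browses += 1
--         elif et == "file_search":
--             searches += 1
--         elif et == "cross_file_reference":
--             cross_refs += 1
--     return {
--         "total_events": len(events),
--         "reads": reads,
--         "writes": writes,
--         "edits": edits,
--         "dirs_created": dirs,
--         "deletes": deletes,
--         "moves": moves,
--         "browses": browses,
--         "searches": searches,
--         "cross_refs": cross_refs,
--         "unique_files_read": len(files_read),
--         "files_created": len(files_created),
--     }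
-- ===== SOURCE B (Python) =====
-- def compute_trace_stats(events: list[dict]) -> dict:
--     """Compute summary statistics from filtered behavioral events."""
--     ets = [e.get("event_type", "") for e in events]
--     files_read = {e.get("file_path", "") for e in events
--                   if e.get("event_type", "") == "file_read" and e.get("file_path", "")}
--     files_created = {e.get("file_path", "") for e in events
--                      if e.get("event_type", "") == "file_write" and e.get("file_path", "")}
--     return {
--         "total_events": len(events),
--         "reads": ets.count("file_read"),
--         "writes": ets.count("file_write"),
--         "edits": ets.count("file_edit"),
--         "dirs_created": ets.count("dir_create"),
--         "deletes": ets.count("file_delete"),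
--         "moves": ets.count("file_move") + ets.count("file_rename"),
--         "browses": ets.count("file_browse"),
--         "searches": ets.count("file_search"),
--         "cross_refs": ets.count("cross_file_reference"),
--         "unique_files_read": len(files_read),
--         "files_created": len(files_created),
--     }
-- ===== Notes on version B (the rewrite author's own statement) =====
-- stated objective: simpler
-- what changed: Replaces A's single accumulator loop with its nine-way if/elif dispatch and mutable counters/sets by one extracted event-type list queried with list.count per category (moves = count('file_move') + count('file_rename')) plus two filtered set comprehensions for the unique-file counts.
import Mathlib
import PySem

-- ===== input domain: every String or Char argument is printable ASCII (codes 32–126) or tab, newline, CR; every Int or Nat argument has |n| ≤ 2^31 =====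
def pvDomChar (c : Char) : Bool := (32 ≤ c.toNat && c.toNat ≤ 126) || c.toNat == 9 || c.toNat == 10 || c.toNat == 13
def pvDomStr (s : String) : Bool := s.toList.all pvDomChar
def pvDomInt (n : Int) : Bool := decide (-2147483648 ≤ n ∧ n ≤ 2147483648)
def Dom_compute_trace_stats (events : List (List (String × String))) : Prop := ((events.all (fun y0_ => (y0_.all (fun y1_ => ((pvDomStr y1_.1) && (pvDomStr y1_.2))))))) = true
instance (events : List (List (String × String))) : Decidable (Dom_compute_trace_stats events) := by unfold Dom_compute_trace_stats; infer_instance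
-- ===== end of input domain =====

-- B replaces A's single accumulator loop (if/elif dispatch + mutable counters/sets) by
-- per-category list.count lookups on the extracted event-type list plus two filtered set
-- comprehensions; objective: simpler (no speed claim).

-- e.get(k, d) on an association list: first match, default when absent (exact for Python
-- dicts, whose keys are unique).
def pvGet (e : List (String × String)) (k d : String) : String :=
  match e.find? (fun p => p.1 == k) with
  | some p => p.2
  | none => d

-- ===== PORT A =====
structure StatsA where
  reads : Int
  writes : Int
  edits : Int
  dirs : Int
  deletes : Int
  moves : Int
  browses : Int
  searches : Int
  crossRefs : Int
  filesRead : PySem.Set String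
  filesCreated : PySem.Set String
  deriving Repr, DecidableEq

def stepA (s : StatsA) (e : List (String × String)) : StatsA :=
  let et := pvGet e "event_type" ""
  let fp := pvGet e "file_path" ""
  if et = "file_read" then
    let s := { s with reads := s.reads + 1 }
    if fp ≠ "" then { s with filesRead := PySem.Set.add s.filesRead fp } else s
  else if et = "file_write" then
    let s := { s with writes := s.writes + 1 }
    if fp ≠ "" then { s with filesCreated := PySem.Set.add s.filesCreated fp } else s
  else if et = "file_edit" then { s with edits := s.edits + 1 }
  else if et = "dir_create" then { s with dirs := s.dirs + 1 }
  else if et = "file_delete" then { s with deletes := s.deletes + 1 }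
  else if et = "file_move" ∨ et = "file_rename" then { s with moves := s.moves + 1 }
  else if et = "file_browse" then { s with browses := s.browses + 1 }
  else if et = "file_search" then { s with searches := s.searches + 1 }
  else if et = "cross_file_reference" then { s with crossRefs := s.crossRefs + 1 }
  else s

def compute_trace_stats (events : List (List (String × String))) : List (String × Int) :=
  let s := events.foldl stepA
    { reads := 0, writes := 0, edits := 0, dirs := 0, deletes := 0, moves := 0,
      browses := 0, searches := 0, crossRefs := 0,
      filesRead := PySem.Set.empty, filesCreated := PySem.Set.empty }
  [("total_events", (events.length : Int)),
   ("reads", s.reads),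
   ("writes", s.writes),
   ("edits", s.edits),
   ("dirs_created", s.dirs),
   ("deletes", s.deletes),
   ("moves", s.moves),
   ("browses", s.browses),
   ("searches", s.searches),
   ("cross_refs", s.crossRefs),
   ("unique_files_read", PySem.Set.len s.filesRead),
   ("files_created", PySem.Set.len s.filesCreated)]

-- ===== PORT B =====
def pvFiles (events : List (List (String × String))) (ty : String) : PySem.Set String :=
  PySem.Set.ofList
    ((events.filter (fun e => pvGet e "event_type" "" = ty ∧ pvGet e "file_path" "" ≠ "")).map
      (fun e => pvGet e "file_path" ""))

def compute_trace_stats_alt (events : List (List (String × String))) : List (String × Int) :=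
  let ets := events.map (fun e => pvGet e "event_type" "")
  let files_read := pvFiles events "file_read"
  let files_created := pvFiles events "file_write"
  [("total_events", (events.length : Int)),
   ("reads", (PySem.List.count ets "file_read" : Int)),
   ("writes", (PySem.List.count ets "file_write" : Int)),
   ("edits", (PySem.List.count ets "file_edit" : Int)),
   ("dirs_created", (PySem.List.count ets "dir_create" : Int)),
   ("deletes", (PySem.List.count ets "file_delete" : Int)),
   ("moves", (PySem.List.count ets "file_move" : Int) + (PySem.List.count ets "file_rename" : Int)),
   ("browses", (PySem.List.count ets "file_browse" : Int)),
   ("searches", (PySem.List.count ets "file_search" : Int)),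
   ("cross_refs", (PySem.List.count ets "cross_file_reference" : Int)),
   ("unique_files_read", PySem.Set.len files_read),
   ("files_created", PySem.Set.len files_created)]

-- ===== PRECONDITION & SPEC =====
def Spec_compute_trace_stats (events : List (List (String × String))) (out : List (String × Int)) : Prop := out = compute_trace_stats_alt events
instance (events : List (List (String × String))) (out : List (String × Int)) : Decidable (Spec_compute_trace_stats events out) := by unfold Spec_compute_trace_stats; infer_instance

-- ===== CLAIM (what is proved, stated in full; the proofs are below) =====
def Claim_equal_compute_trace_stats : Prop := ∀ (events : List (List (String × String))), Dom_compute_trace_stats events → Spec_compute_trace_stats events (compute_trace_stats events)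

-- ===== LEMMAS AND PROOFS =====

set_option maxHeartbeats 1000000 in
lemma stepA_reads (s : StatsA) (e : List (String × String)) :
    (stepA s e).reads = s.reads + if pvGet e "event_type" "" = "file_read" then 1 else 0 := by
  unfold stepA
  by_cases h : pvGet e "event_type" "" = "file_read" <;> simp only [h] <;> split_ifs <;> simp_all

set_option maxHeartbeats 1000000 in
lemma stepA_writes (s : StatsA) (e : List (String × String)) :
    (stepA s e).writes = s.writes + if pvGet e "event_type" "" = "file_write" then 1 else 0 := by
  unfold stepA
  by_cases h : pvGet e "event_type" "" = "file_write" <;> simp only [h] <;> split_ifs <;> simp_all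

set_option maxHeartbeats 1000000 in
lemma stepA_edits (s : StatsA) (e : List (String × String)) :
    (stepA s e).edits = s.edits + if pvGet e "event_type" "" = "file_edit" then 1 else 0 := by
  unfold stepA
  by_cases h : pvGet e "event_type" "" = "file_edit" <;> simp only [h] <;> split_ifs <;> simp_all

set_option maxHeartbeats 1000000 in
lemma stepA_dirs (s : StatsA) (e : List (String × String)) :
    (stepA s e).dirs = s.dirs + if pvGet e "event_type" "" = "dir_create" then 1 else 0 := by
  unfold stepA
  by_cases h : pvGet e "event_type" "" = "dir_create" <;> simp only [h] <;> split_ifs <;> simp_all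

set_option maxHeartbeats 1000000 in
lemma stepA_deletes (s : StatsA) (e : List (String × String)) :
    (stepA s e).deletes = s.deletes + if pvGet e "event_type" "" = "file_delete" then 1 else 0 := by
  unfold stepA
  by_cases h : pvGet e "event_type" "" = "file_delete" <;> simp only [h] <;> split_ifs <;> simp_all

set_option maxHeartbeats 1000000 in
lemma stepA_moves (s : StatsA) (e : List (String × String)) :
    (stepA s e).moves = s.moves
      + (if pvGet e "event_type" "" = "file_move" then 1 else 0)
      + (if pvGet e "event_type" "" = "file_rename" then 1 else 0) := by
  unfold stepA
  by_cases h1 : pvGet e "event_type" "" = "file_move" <;>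
    by_cases h2 : pvGet e "event_type" "" = "file_rename" <;>
      simp only [h1, h2] <;> split_ifs <;> simp_all

set_option maxHeartbeats 1000000 in
lemma stepA_browses (s : StatsA) (e : List (String × String)) :
    (stepA s e).browses = s.browses + if pvGet e "event_type" "" = "file_browse" then 1 else 0 := by
  unfold stepA
  by_cases h : pvGet e "event_type" "" = "file_browse" <;> simp only [h] <;> split_ifs <;> simp_all

set_option maxHeartbeats 1000000 in
lemma stepA_searches (s : StatsA) (e : List (String × String)) :
    (stepA s e).searches = s.searches + if pvGet e "event_type" "" = "file_search" then 1 else 0 := by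
  unfold stepA
  by_cases h : pvGet e "event_type" "" = "file_search" <;> simp only [h] <;> split_ifs <;> simp_all

set_option maxHeartbeats 1000000 in
lemma stepA_crossRefs (s : StatsA) (e : List (String × String)) :
    (stepA s e).crossRefs = s.crossRefs + if pvGet e "event_type" "" = "cross_file_reference" then 1 else 0 := by
  unfold stepA
  by_cases h : pvGet e "event_type" "" = "cross_file_reference" <;> simp only [h] <;> split_ifs <;> simp_all

set_option maxHeartbeats 1000000 in
lemma stepA_filesRead (s : StatsA) (e : List (String × String)) :
    (stepA s e).filesRead =
      if pvGet e "event_type" "" = "file_read" ∧ pvGet e "file_path" "" ≠ "" then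
        PySem.Set.add s.filesRead (pvGet e "file_path" "") else s.filesRead := by
  unfold stepA
  by_cases h : pvGet e "event_type" "" = "file_read" <;> simp only [h] <;> split_ifs <;> simp_all

set_option maxHeartbeats 1000000 in
lemma stepA_filesCreated (s : StatsA) (e : List (String × String)) :
    (stepA s e).filesCreated =
      if pvGet e "event_type" "" = "file_write" ∧ pvGet e "file_path" "" ≠ "" then
        PySem.Set.add s.filesCreated (pvGet e "file_path" "") else s.filesCreated := by
  unfold stepA
  by_cases h : pvGet e "event_type" "" = "file_write" <;> simp only [h] <;> split_ifs <;> simp_all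

-- one loop step contributes (0 or 1) to a counter field ⇒ the whole loop adds the count
lemma foldl_count_field (l : List (List (String × String))) (ty : String)
    (f : StatsA → Int)
    (hf : ∀ s e, f (stepA s e) = f s + if pvGet e "event_type" "" = ty then 1 else 0) :
    ∀ s : StatsA, f (l.foldl stepA s)
      = f s + ((l.map (fun e => pvGet e "event_type" "")).count ty : Int) := by
  induction l with
  | nil => simp
  | cons e es ih =>
    intro s
    rw [List.foldl_cons, ih, hf]
    simp only [List.map_cons, List.count_cons, beq_iff_eq]
    split_ifs with h <;> simp <;> ring

lemma foldl_moves_field (l : List (List (String × String))) :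
    ∀ s : StatsA, (l.foldl stepA s).moves
      = s.moves + ((l.map (fun e => pvGet e "event_type" "")).count "file_move" : Int)
               + ((l.map (fun e => pvGet e "event_type" "")).count "file_rename" : Int) := by
  induction l with
  | nil => simp
  | cons e es ih =>
    intro s
    rw [List.foldl_cons, ih, stepA_moves]
    simp only [List.map_cons, List.count_cons, beq_iff_eq]
    split_ifs with h1 h2 <;> simp_all <;> ring

-- one loop step adds the file path to a set field exactly when the filter keeps the event
lemma foldl_set_field (l : List (List (String × String))) (ty : String)
    (f : StatsA → PySem.Set String)
    (hf : ∀ s e, f (stepA s e) =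
      if pvGet e "event_type" "" = ty ∧ pvGet e "file_path" "" ≠ "" then
        PySem.Set.add (f s) (pvGet e "file_path" "") else f s) :
    ∀ s : StatsA, f (l.foldl stepA s)
      = PySem.Set.update (f s)
          ((l.filter (fun e => pvGet e "event_type" "" = ty ∧ pvGet e "file_path" "" ≠ "")).map
            (fun e => pvGet e "file_path" "")) := by
  induction l with
  | nil => intro s; simp [PySem.Set.update]
  | cons e es ih =>
    intro s
    rw [List.foldl_cons, ih, hf]
    by_cases h : pvGet e "event_type" "" = ty ∧ pvGet e "file_path" "" ≠ "" <;>
      simp [h, PySem.Set.update]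

theorem compute_trace_stats_spec : Claim_equal_compute_trace_stats := by
  intro events _
  show compute_trace_stats events = compute_trace_stats_alt events
  simp only [compute_trace_stats, compute_trace_stats_alt, pvFiles]
  rw [foldl_count_field events "file_read" StatsA.reads stepA_reads,
    foldl_count_field events "file_write" StatsA.writes stepA_writes,
    foldl_count_field events "file_edit" StatsA.edits stepA_edits,
    foldl_count_field events "dir_create" StatsA.dirs stepA_dirs,
    foldl_count_field events "file_delete" StatsA.deletes stepA_deletes,
    foldl_moves_field events,
    foldl_count_field events "file_browse" StatsA.browses stepA_browses,
    foldl_count_field events "file_search" StatsA.searches stepA_searches,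
    foldl_count_field events "cross_file_reference" StatsA.crossRefs stepA_crossRefs,
    foldl_set_field events "file_read" StatsA.filesRead stepA_filesRead,
    foldl_set_field events "file_write" StatsA.filesCreated stepA_filesCreated]
  simp [PySem.List.count_eq, PySem.Set.update, PySem.Set.ofList_eq_foldl, PySem.Set.empty]
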